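-- pv_equiv track=rewrite | github.com/shoeheng/dbmle_stata | src/dbmle/core.py | _disjoint_intervals
-- ===== SOURCE A (Python) =====
-- from typing import Dict, Tuple, List, Any, Optional
--
-- def _disjoint_intervals(vals: List[int]) -> List[Tuple[int, int]]:
--     """
--     Take a list like [1,2,3,7,8] and return [(1,3), (7,8)].
--     """
--     if not vals:
--         return []
--     vals = sorted(set(vals))
--     start = prev = vals[0]
--     out: List[Tuple[int, int]] = []
--     for v in vals[1:]:
--         if v == prev + 1:
--             prev = v
--             continue
--         out.append((start, prev))
--         start = prev = v
--     out.append((start, prev))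
--     return out
-- ===== SOURCE B (Python) =====
-- def _disjoint_intervals(vals):
--     s = sorted(set(vals))
--     breaks = [(u, v) for u, v in zip(s, s[1:]) if v != u + 1]
--     starts = s[:1] + [v for u, v in breaks]
--     ends = [u for u, v in breaks] + s[-1:]
--     return list(zip(starts, ends))
-- ===== Notes on version B (the rewrite author's own statement) =====
-- stated objective: idiomatic
-- what changed: Replaces the start/prev state machine with stateless boundary detection: zip the sorted-deduplicated list with its own tail, the non-consecutive adjacent pairs are the breaks, and the intervals are zip(first-element + break-successors, break-predecessors + last-element).
import Mathlib
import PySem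

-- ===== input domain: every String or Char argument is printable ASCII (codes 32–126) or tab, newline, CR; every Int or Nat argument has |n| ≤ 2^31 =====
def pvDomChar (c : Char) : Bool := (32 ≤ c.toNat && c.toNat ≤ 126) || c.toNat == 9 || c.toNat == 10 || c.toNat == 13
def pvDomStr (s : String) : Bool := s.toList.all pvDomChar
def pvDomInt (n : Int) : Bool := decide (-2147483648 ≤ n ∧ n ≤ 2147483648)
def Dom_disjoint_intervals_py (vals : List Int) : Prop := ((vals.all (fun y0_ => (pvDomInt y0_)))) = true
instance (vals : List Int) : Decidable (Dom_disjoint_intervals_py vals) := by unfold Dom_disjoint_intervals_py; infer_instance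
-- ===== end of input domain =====

-- B replaces A's start/prev state machine with stateless boundary detection via zip(s, s[1:]) (idiomatic; same cost).

-- ===== PORT A =====
def pvLoopA (start prev : Int) (out : List (Int × Int)) (t : List Int) : List (Int × Int) :=
  let st := t.foldl
    (fun (acc : Int × Int × List (Int × Int)) v =>
      if v = acc.2.1 + 1 then (acc.1, v, acc.2.2)
      else (v, v, acc.2.2 ++ [(acc.1, acc.2.1)])) (start, prev, out)
  st.2.2 ++ [(st.1, st.2.1)]

def disjoint_intervals_py (vals : List Int) : List (Int × Int) :=
  if vals = [] then []
  else
    let s := PySem.List.sorted (PySem.Set.ofList vals) (fun x => x) false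
    match PySem.List.pyGet? s 0 with
    | none => []   -- unreachable totality guard: s is nonempty here (Python never raises)
    | some v0 => pvLoopA v0 v0 [] (PySem.List.slice s (some 1) none)

-- ===== PORT B =====
def disjoint_intervals_py_alt (vals : List Int) : List (Int × Int) :=
  let s := PySem.List.sorted (PySem.Set.ofList vals) (fun x => x) false
  let breaks := (s.zip (PySem.List.slice s (some 1) none)).filter (fun p => p.2 ≠ p.1 + 1)
  let starts := PySem.List.slice s none (some 1) ++ breaks.map Prod.snd
  let ends := breaks.map Prod.fst ++ PySem.List.slice s (some (-1)) none
  starts.zip ends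

-- ===== PRECONDITION & SPEC =====
def Spec_disjoint_intervals_py (vals : List Int) (out : List (Int × Int)) : Prop := out = disjoint_intervals_py_alt vals
instance (vals : List Int) (out : List (Int × Int)) : Decidable (Spec_disjoint_intervals_py vals out) := by unfold Spec_disjoint_intervals_py; infer_instance

-- ===== CLAIM (what is proved, stated in full; the proofs are below) =====
def Claim_equal_disjoint_intervals_py : Prop := ∀ (vals : List Int), Dom_disjoint_intervals_py vals → Spec_disjoint_intervals_py vals (disjoint_intervals_py vals)

-- ===== LEMMAS AND PROOFS =====

-- the non-consecutive adjacent pairs of a list (B's `breaks` for s = prev :: t is pvBks prev t)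
def pvBks (prev : Int) (t : List Int) : List (Int × Int) :=
  ((prev :: t).zip t).filter (fun p => p.2 ≠ p.1 + 1)

theorem pvBks_cons (prev v : Int) (t : List Int) :
    pvBks prev (v :: t) =
      (if v = prev + 1 then ([] : List (Int × Int)) else [(prev, v)]) ++ pvBks v t := by
  simp [pvBks, List.filter]
  split_ifs with h <;> simp [h]

theorem pvLoopA_nil (start prev : Int) (out : List (Int × Int)) :
    pvLoopA start prev out [] = out ++ [(start, prev)] := rfl

theorem pvLoopA_cons (start prev v : Int) (out : List (Int × Int)) (t : List Int) :
    pvLoopA start prev out (v :: t) =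
      if v = prev + 1 then pvLoopA start v out t
      else pvLoopA v v (out ++ [(start, prev)]) t := by
  simp only [pvLoopA, List.foldl_cons]
  split_ifs <;> rfl

theorem pv_getLastD_cons (v prev : Int) (t : List Int) :
    (v :: t).getLast?.getD prev = t.getLast?.getD v := by
  cases t <;> simp [List.getLast?_cons]

-- A's loop (with final append) equals B's zip of boundary lists, for any tail t and state
theorem pv_loop_eq (t : List Int) : ∀ (start prev : Int) (out : List (Int × Int)),
    pvLoopA start prev out t
    = out ++ ((start :: (pvBks prev t).map Prod.snd).zip
              ((pvBks prev t).map Prod.fst ++ [t.getLastD prev])) := by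
  induction t with
  | nil => intro start prev out; simp [pvBks, pvLoopA_nil]
  | cons v t ih =>
    intro start prev out
    rw [pvLoopA_cons, pvBks_cons]
    by_cases h : v = prev + 1
    · rw [if_pos h, ih start v out]
      simp [h, pv_getLastD_cons]
    · rw [if_neg h, ih v v (out ++ [(start, prev)])]
      simp [h, pv_getLastD_cons]

theorem pv_drop_last (v0 : Int) (rest : List Int) :
    (v0 :: rest).drop ((v0 :: rest).length - 1) = [rest.getLastD v0] := by
  induction rest generalizing v0 with
  | nil => simp
  | cons a t ih => simpa [pv_getLastD_cons] using ih a

theorem pv_sorted_ne_nil (vals : List Int) (h : vals ≠ []) :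
    PySem.List.sorted (PySem.Set.ofList vals) (fun x => x) false ≠ [] := by
  intro hs
  rw [PySem.List.sorted_eq_nil_iff] at hs
  rcases vals with _ | ⟨a, t⟩
  · exact h rfl
  · have : a ∈ PySem.Set.ofList (a :: t) := by
      rw [PySem.Set.mem_ofList]; exact List.mem_cons_self
    simp [hs] at this

-- ===== VERDICT (by name: the statement is the Claim_ definition above) =====
theorem disjoint_intervals_py_spec : Claim_equal_disjoint_intervals_py := by
  intro vals _
  unfold Spec_disjoint_intervals_py disjoint_intervals_py disjoint_intervals_py_alt
  by_cases hv : vals = []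
  · subst hv; simp [PySem.List.sorted, PySem.Set.ofList, PySem.List.slice]
  · simp only [if_neg hv]
    obtain ⟨v0, rest, hs⟩ : ∃ v0 rest,
        PySem.List.sorted (PySem.Set.ofList vals) (fun x => x) false = v0 :: rest := by
      rcases h : PySem.List.sorted (PySem.Set.ofList vals) (fun x => x) false with _ | ⟨a, t⟩
      · exact absurd h (pv_sorted_ne_nil vals hv)
      · exact ⟨a, t, rfl⟩
    rw [hs]
    rw [PySem.List.slice_from_one, PySem.List.slice_from_neg_one, pv_drop_last]
    have h1 : PySem.List.pyGet? (v0 :: rest) (0 : Int) = some v0 := by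
      simp [PySem.List.pyGet?, PySem.List.pyIdx?]
    rw [h1]
    show pvLoopA v0 v0 [] rest = _
    rw [pv_loop_eq rest v0 v0 []]
    have h2 : PySem.List.slice (v0 :: rest) none (some 1) = [v0] := by
      simp [pysem]
    rw [h2]
    rfl
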